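-- pv_equiv track=rewrite | github.com/Jaypeee16/Project_Info | secure_journal_app.py | _remove_playfair_padding
-- ===== SOURCE A (Python) =====
-- PLAYFAIR_FILLERS = ("X", "Q")
--
-- def _remove_playfair_padding(text: str) -> str:
--     if not text:
--         return text
--     cleaned: list[str] = []
--     index = 0
--     while index < len(text):
--         if index + 2 < len(text) and text[index] == text[index + 2] and text[index + 1] in PLAYFAIR_FILLERS:
--             cleaned.append(text[index])
--             index += 2
--         else:
--             cleaned.append(text[index])
--             index += 1
--     if cleaned and cleaned[-1] in PLAYFAIR_FILLERS:
--         cleaned.pop()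
--     return "".join(cleaned)
-- ===== SOURCE B (Python) =====
-- import re
--
-- PLAYFAIR_FILLERS = ("X", "Q")
--
-- # One regex substitution: drop a filler letter sandwiched between two equal
-- # characters; the lookahead leaves the second equal character unconsumed, so
-- # the engine re-anchors on it exactly as the index+2 scan does.
-- _PAD_RE = re.compile(r"(.)([" + "".join(PLAYFAIR_FILLERS) + r"])(?=\1)", re.DOTALL)
--
-- def _remove_playfair_padding(text: str) -> str:
--     result = _PAD_RE.sub(r"\1", text)
--     if result and result[-1] in PLAYFAIR_FILLERS:
--         result = result[:-1]
--     return result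
-- ===== Notes on version B (the rewrite author's own statement) =====
-- stated objective: idiomatic
-- what changed: Replaced the hand-written index-scanning while loop with a single compiled regex substitution (a dot capture, a filler class, and a lookahead for the repeated letter, so the engine re-anchors on the unconsumed equal letter exactly like the loop's index+=2), followed by the same trailing-filler trim.
import Mathlib
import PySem

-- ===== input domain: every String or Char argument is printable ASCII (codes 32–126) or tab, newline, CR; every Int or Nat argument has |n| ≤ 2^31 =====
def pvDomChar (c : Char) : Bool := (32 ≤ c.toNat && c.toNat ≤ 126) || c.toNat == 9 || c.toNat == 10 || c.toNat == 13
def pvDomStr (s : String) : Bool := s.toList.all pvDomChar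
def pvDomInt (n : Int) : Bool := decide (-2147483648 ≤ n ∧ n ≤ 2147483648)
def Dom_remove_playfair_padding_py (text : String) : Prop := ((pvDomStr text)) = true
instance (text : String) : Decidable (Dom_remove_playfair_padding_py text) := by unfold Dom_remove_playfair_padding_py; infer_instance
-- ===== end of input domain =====

-- B replaces A's explicit index-scanning loop with a single regex substitution
-- (pattern (.)([XQ])(?=\1) with DOTALL) plus the same trailing-filler trim;
-- objective: idiomatic, same value on every input.


-- ===== PORT A =====
-- PLAYFAIR_FILLERS = ("X", "Q")
def pvFillers : List Char := ['X', 'Q']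

-- the while loop of A: `index` scans the fixed character sequence `cs`,
-- `cleaned` is the accumulator list; text[i] is in range whenever read, ported as getD.
def pvALoop (cs : List Char) (index : Nat) (cleaned : List Char) : List Char :=
  if index < cs.length then
    if index + 2 < cs.length ∧ cs.getD index ' ' = cs.getD (index + 2) ' '
        ∧ cs.getD (index + 1) ' ' ∈ pvFillers then
      pvALoop cs (index + 2) (cleaned ++ [cs.getD index ' '])
    else
      pvALoop cs (index + 1) (cleaned ++ [cs.getD index ' '])
  else cleaned
termination_by cs.length - index
decreasing_by all_goals omega

def remove_playfair_padding_py (text : String) : String :=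
  if text.toList = [] then text   -- `if not text: return text`
  else
    let cleaned := pvALoop text.toList 0 []
    -- `if cleaned and cleaned[-1] in PLAYFAIR_FILLERS: cleaned.pop()`
    let cleaned := if cleaned ≠ [] ∧ cleaned.getLast! ∈ pvFillers then cleaned.dropLast else cleaned
    String.ofList cleaned   -- "".join(cleaned)

-- ===== PORT B =====
-- hand port of the fixed-pattern regex sub `(.)([XQ])(?=\1)` -> `\1`:
-- the engine scans left to right; a match consumes two characters (the
-- lookahead char stays), emits the first, and the scan resumes on the
-- unconsumed lookahead character; on no match one character is passed through.
def pvSub : List Char → List Char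
  | [] => []
  | [c0] => [c0]
  | [c0, c1] => [c0, c1]
  | c0 :: c1 :: c2 :: rest =>
      if (c1 = 'X' ∨ c1 = 'Q') ∧ c2 = c0 then c0 :: pvSub (c2 :: rest)
      else c0 :: pvSub (c1 :: c2 :: rest)

def remove_playfair_padding_py_alt (text : String) : String :=
  let result := pvSub text.toList
  -- `if result and result[-1] in PLAYFAIR_FILLERS: result = result[:-1]`
  let result := if result ≠ [] ∧ result.getLast! ∈ pvFillers then result.dropLast else result
  String.ofList result

-- ===== PRECONDITION & SPEC =====
def Spec_remove_playfair_padding_py (text : String) (out : String) : Prop := out = remove_playfair_padding_py_alt text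
instance (text : String) (out : String) : Decidable (Spec_remove_playfair_padding_py text out) := by unfold Spec_remove_playfair_padding_py; infer_instance

-- ===== CLAIM (what is proved, stated in full; the proofs are below) =====
def Claim_equal_remove_playfair_padding_py : Prop := ∀ (text : String), Dom_remove_playfair_padding_py text → Spec_remove_playfair_padding_py text (remove_playfair_padding_py text)

-- ===== LEMMAS AND PROOFS =====

-- pvSub passes one character through when no match starts at it
theorem pvSub_cons_of_no_match (c0 : Char) (t : List Char)
    (h : ∀ c1 c2 r, t = c1 :: c2 :: r → ¬((c1 = 'X' ∨ c1 = 'Q') ∧ c2 = c0)) :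
    pvSub (c0 :: t) = c0 :: pvSub t := by
  match t with
  | [] => rfl
  | [c1] => rfl
  | c1 :: c2 :: r =>
      simp only [pvSub]
      rw [if_neg (h c1 c2 r rfl)]

-- pvSub consumes two characters and emits the first on a match
theorem pvSub_cons_match (c0 c1 : Char) (r : List Char) (h1 : c1 = 'X' ∨ c1 = 'Q') :
    pvSub (c0 :: c1 :: c0 :: r) = c0 :: pvSub (c0 :: r) := by
  simp [pvSub, h1]

-- A's index loop computes, past the accumulator, exactly B's scan of the remaining suffix.
theorem pvALoop_eq_pvSub (cs : List Char) (index : Nat) (cleaned : List Char) :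
    pvALoop cs index cleaned = cleaned ++ pvSub (cs.drop index) := by
  rw [pvALoop]
  by_cases h : index < cs.length
  · rw [if_pos h]
    by_cases hc : index + 2 < cs.length ∧ cs.getD index ' ' = cs.getD (index + 2) ' '
        ∧ cs.getD (index + 1) ' ' ∈ pvFillers
    · rw [if_pos hc, pvALoop_eq_pvSub]
      obtain ⟨h2, heq, hf⟩ := hc
      have h1 : index + 1 < cs.length := by omega
      rw [List.getD_eq_getElem _ _ h, List.getD_eq_getElem _ _ h2] at heq
      rw [List.getD_eq_getElem _ _ h1] at hf
      rw [List.drop_eq_getElem_cons h, List.drop_eq_getElem_cons h1,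
          List.drop_eq_getElem_cons h2, ← heq, List.getD_eq_getElem _ _ h,
          pvSub_cons_match _ _ _ (by simpa [pvFillers] using hf)]
      simp
    · rw [if_neg hc, pvALoop_eq_pvSub, List.drop_eq_getElem_cons h,
          List.getD_eq_getElem _ _ h]
      rw [pvSub_cons_of_no_match]
      · simp
      · intro c1 c2 r hdrop hbad
        have h2 : index + 2 < cs.length := by
          have := congrArg List.length hdrop
          simp [List.length_drop] at this
          omega
        have h1 : index + 1 < cs.length := by omega
        rw [List.drop_eq_getElem_cons h1, List.drop_eq_getElem_cons h2] at hdrop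
        injection hdrop with e1 hdrop
        injection hdrop with e2 _
        apply hc
        refine ⟨h2, ?_, ?_⟩
        · rw [List.getD_eq_getElem _ _ h, List.getD_eq_getElem _ _ h2, e2]
          exact hbad.2.symm
        · rw [List.getD_eq_getElem _ _ h1, e1]
          simpa [pvFillers] using hbad.1
  · rw [if_neg h]
    rw [List.drop_eq_nil_of_le (by omega), pvSub, List.append_nil]
termination_by cs.length - index
decreasing_by all_goals omega

-- ===== VERDICT (by name: the statement is the Claim_ definition above) =====
theorem remove_playfair_padding_py_spec : Claim_equal_remove_playfair_padding_py := by
  intro text _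
  unfold Spec_remove_playfair_padding_py remove_playfair_padding_py remove_playfair_padding_py_alt
  by_cases hnil : text.toList = []
  · have : text = "" := by
      rw [← @String.ofList_toList text, hnil]
    simp [this, pvSub]
  · simp only [if_neg hnil]
    rw [pvALoop_eq_pvSub, List.drop_zero, List.nil_append]
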